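-- pv_equiv track=rewrite | github.com/raf1843/NSSA220-Project2 | Code/compute_metrics.py | size_metrics
-- ===== SOURCE A (Python) =====
-- def size_metrics(packets):
-- 	# counters
-- 	num_req_sent = 0
-- 	num_req_recv = 0
-- 	num_rep_sent = 0
-- 	num_rep_recv = 0
-- 	# bytes based on frame, data based on ICMP
-- 	req_bytes_sent = 0
-- 	req_bytes_recv = 0
-- 	req_data_sent = 0
-- 	req_data_recv = 0
--
-- 	for p in packets:
-- 		# to get data from bytes
-- 		length = p[5] # this will be passed in from data
-- 		data = p[6]
--
-- 		# request
-- 		if "Request" in p[4]: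
-- 			# sent or recv
-- 			if "Sent" in p[4]:
-- 				num_req_sent += 1
-- 				req_bytes_sent += length
-- 				req_data_sent += data
-- 			else:
-- 				num_req_recv += 1
-- 				req_bytes_recv += length
-- 				req_data_recv += data
-- 		# reply
-- 		else:
-- 			# sent or recv
-- 			if "Sent" in p[4]:
-- 				num_rep_sent += 1
-- 			else:
-- 				num_rep_recv += 1
--
--
-- 	return [num_req_sent, num_req_recv, num_rep_sent, num_rep_recv, \
-- 		req_bytes_sent, req_bytes_recv, req_data_sent, req_data_recv]
-- ===== SOURCE B (Python) =====
-- def size_metrics(packets):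
-- 	def is_req(p):
-- 		return "Request" in p[4]
-- 	def is_sent(p):
-- 		return "Sent" in p[4]
-- 	return [
-- 		sum(1 for p in packets if is_req(p) and is_sent(p)),
-- 		sum(1 for p in packets if is_req(p) and not is_sent(p)),
-- 		sum(1 for p in packets if not is_req(p) and is_sent(p)),
-- 		sum(1 for p in packets if not is_req(p) and not is_sent(p)),
-- 		sum(p[5] for p in packets if is_req(p) and is_sent(p)),
-- 		sum(p[5] for p in packets if is_req(p) and not is_sent(p)),
-- 		sum(p[6] for p in packets if is_req(p) and is_sent(p)),
-- 		sum(p[6] for p in packets if is_req(p) and not is_sent(p)),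
-- 	]
-- ===== Notes on version B (the rewrite author's own statement) =====
-- stated objective: idiomatic
-- what changed: Replaced the single eight-accumulator loop with eight independent filtered reductions (one sum/count per output), a different decomposition and traversal.
import Mathlib
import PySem

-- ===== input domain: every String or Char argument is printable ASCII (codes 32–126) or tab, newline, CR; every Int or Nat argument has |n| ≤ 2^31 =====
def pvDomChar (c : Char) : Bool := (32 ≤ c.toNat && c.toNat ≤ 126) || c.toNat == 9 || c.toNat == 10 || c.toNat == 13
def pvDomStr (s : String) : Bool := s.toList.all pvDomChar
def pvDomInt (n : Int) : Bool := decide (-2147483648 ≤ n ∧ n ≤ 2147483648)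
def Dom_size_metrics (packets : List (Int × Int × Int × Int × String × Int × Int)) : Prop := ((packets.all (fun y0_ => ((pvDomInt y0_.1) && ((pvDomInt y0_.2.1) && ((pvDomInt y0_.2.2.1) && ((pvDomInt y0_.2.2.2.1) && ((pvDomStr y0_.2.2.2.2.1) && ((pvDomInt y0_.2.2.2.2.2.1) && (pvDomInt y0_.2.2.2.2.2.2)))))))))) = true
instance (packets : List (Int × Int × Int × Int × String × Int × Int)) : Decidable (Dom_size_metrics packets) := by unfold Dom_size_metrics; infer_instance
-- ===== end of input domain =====

-- B replaces A's single eight-accumulator loop by eight independent filtered reductions (idiomatic; same O(n) cost).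

-- ===== PORT A =====
def size_metrics (packets : List (Int × Int × Int × Int × String × Int × Int)) : List Int :=
  let s := packets.foldl (fun st p =>
    let length := p.2.2.2.2.2.1
    let data := p.2.2.2.2.2.2
    if PySem.Str.isIn "Request" p.2.2.2.2.1 then
      if PySem.Str.isIn "Sent" p.2.2.2.2.1 then
        (st.1 + 1, st.2.1, st.2.2.1, st.2.2.2.1, st.2.2.2.2.1 + length, st.2.2.2.2.2.1, st.2.2.2.2.2.2.1 + data, st.2.2.2.2.2.2.2)
      else
        (st.1, st.2.1 + 1, st.2.2.1, st.2.2.2.1, st.2.2.2.2.1, st.2.2.2.2.2.1 + length, st.2.2.2.2.2.2.1, st.2.2.2.2.2.2.2 + data)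
    else
      if PySem.Str.isIn "Sent" p.2.2.2.2.1 then
        (st.1, st.2.1, st.2.2.1 + 1, st.2.2.2.1, st.2.2.2.2.1, st.2.2.2.2.2.1, st.2.2.2.2.2.2.1, st.2.2.2.2.2.2.2)
      else
        (st.1, st.2.1, st.2.2.1, st.2.2.2.1 + 1, st.2.2.2.2.1, st.2.2.2.2.2.1, st.2.2.2.2.2.2.1, st.2.2.2.2.2.2.2))
    ((0, 0, 0, 0, 0, 0, 0, 0) : Int × Int × Int × Int × Int × Int × Int × Int)
  [s.1, s.2.1, s.2.2.1, s.2.2.2.1, s.2.2.2.2.1, s.2.2.2.2.2.1, s.2.2.2.2.2.2.1, s.2.2.2.2.2.2.2]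

-- ===== PORT B =====
def pvIsReq (p : Int × Int × Int × Int × String × Int × Int) : Bool := PySem.Str.isIn "Request" p.2.2.2.2.1
def pvIsSent (p : Int × Int × Int × Int × String × Int × Int) : Bool := PySem.Str.isIn "Sent" p.2.2.2.2.1

def size_metrics_alt (packets : List (Int × Int × Int × Int × String × Int × Int)) : List Int :=
  [ (packets.countP (fun p => pvIsReq p && pvIsSent p) : Int),
    (packets.countP (fun p => pvIsReq p && !pvIsSent p) : Int),
    (packets.countP (fun p => !pvIsReq p && pvIsSent p) : Int),
    (packets.countP (fun p => !pvIsReq p && !pvIsSent p) : Int),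
    ((packets.filter (fun p => pvIsReq p && pvIsSent p)).map (fun p => p.2.2.2.2.2.1)).sum,
    ((packets.filter (fun p => pvIsReq p && !pvIsSent p)).map (fun p => p.2.2.2.2.2.1)).sum,
    ((packets.filter (fun p => pvIsReq p && pvIsSent p)).map (fun p => p.2.2.2.2.2.2)).sum,
    ((packets.filter (fun p => pvIsReq p && !pvIsSent p)).map (fun p => p.2.2.2.2.2.2)).sum ]

-- ===== PRECONDITION & SPEC =====
def Spec_size_metrics (packets : List (Int × Int × Int × Int × String × Int × Int)) (out : List Int) : Prop := out = size_metrics_alt packets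
instance (packets : List (Int × Int × Int × Int × String × Int × Int)) (out : List Int) : Decidable (Spec_size_metrics packets out) := by unfold Spec_size_metrics; infer_instance

-- ===== CLAIM (what is proved, stated in full; the proofs are below) =====
def Claim_equal_size_metrics : Prop := ∀ (packets : List (Int × Int × Int × Int × String × Int × Int)), Dom_size_metrics packets → Spec_size_metrics packets (size_metrics packets)

-- ===== LEMMAS AND PROOFS =====

theorem size_metrics_foldl (packets : List (Int × Int × Int × Int × String × Int × Int))
    (a b c d e f g h : Int) :
    packets.foldl (fun st p =>
      let length := p.2.2.2.2.2.1
      let data := p.2.2.2.2.2.2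
      if PySem.Str.isIn "Request" p.2.2.2.2.1 then
        if PySem.Str.isIn "Sent" p.2.2.2.2.1 then
          (st.1 + 1, st.2.1, st.2.2.1, st.2.2.2.1, st.2.2.2.2.1 + length, st.2.2.2.2.2.1, st.2.2.2.2.2.2.1 + data, st.2.2.2.2.2.2.2)
        else
          (st.1, st.2.1 + 1, st.2.2.1, st.2.2.2.1, st.2.2.2.2.1, st.2.2.2.2.2.1 + length, st.2.2.2.2.2.2.1, st.2.2.2.2.2.2.2 + data)
      else
        if PySem.Str.isIn "Sent" p.2.2.2.2.1 then
          (st.1, st.2.1, st.2.2.1 + 1, st.2.2.2.1, st.2.2.2.2.1, st.2.2.2.2.2.1, st.2.2.2.2.2.2.1, st.2.2.2.2.2.2.2)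
        else
          (st.1, st.2.1, st.2.2.1, st.2.2.2.1 + 1, st.2.2.2.2.1, st.2.2.2.2.2.1, st.2.2.2.2.2.2.1, st.2.2.2.2.2.2.2))
      ((a, b, c, d, e, f, g, h) : Int × Int × Int × Int × Int × Int × Int × Int)
    = (a + (packets.countP (fun p => pvIsReq p && pvIsSent p) : Int),
       b + (packets.countP (fun p => pvIsReq p && !pvIsSent p) : Int),
       c + (packets.countP (fun p => !pvIsReq p && pvIsSent p) : Int),
       d + (packets.countP (fun p => !pvIsReq p && !pvIsSent p) : Int),
       e + ((packets.filter (fun p => pvIsReq p && pvIsSent p)).map (fun p => p.2.2.2.2.2.1)).sum,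
       f + ((packets.filter (fun p => pvIsReq p && !pvIsSent p)).map (fun p => p.2.2.2.2.2.1)).sum,
       g + ((packets.filter (fun p => pvIsReq p && pvIsSent p)).map (fun p => p.2.2.2.2.2.2)).sum,
       h + ((packets.filter (fun p => pvIsReq p && !pvIsSent p)).map (fun p => p.2.2.2.2.2.2)).sum) := by
  induction packets generalizing a b c d e f g h with
  | nil => simp
  | cons p ps ih =>
    by_cases hr : PySem.Str.isIn "Request" p.2.2.2.2.1 <;>
      by_cases hs : PySem.Str.isIn "Sent" p.2.2.2.2.1 <;>
        simp only [List.foldl_cons, List.countP_cons, List.filter_cons, pvIsReq, pvIsSent,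
          hr, hs, Bool.not_true, Bool.not_false, Bool.and_true, Bool.and_false,
          if_true, if_false, Bool.false_eq_true, List.map_cons, List.sum_cons, ih,
          Prod.mk.injEq] <;>
      and_intros <;> push_cast <;> ring

-- ===== VERDICT (by name: the statement is the Claim_ definition above) =====
theorem size_metrics_spec : Claim_equal_size_metrics := by
  intro packets _
  unfold Spec_size_metrics size_metrics size_metrics_alt
  simp only [size_metrics_foldl]
  simp
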